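-- pv_equiv track=rewrite | github.com/Los-Phoenix/NFETC-FCLC | preprocess_gt_wikim.py | read_out_type
-- ===== SOURCE A (Python) =====
-- def read_out_type(types):
--     out_type = []
--     for a in types:
--         flag = True
--         for b in types:
--             if len(a) >= len(b):
--                 continue
--             if (a == b[:len(a)]) and (b[len(a)] == '/'):
--                 flag = False
--         if flag:
--             out_type.append(a)
--     return out_type
-- ===== SOURCE B (Python) =====
-- def read_out_type(types):
--     parents = set()
--     for b in types:
--         for i, ch in enumerate(b):
--             if ch == '/':
--                 parents.add(b[:i])
--     return [a for a in types if a not in parents]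
-- ===== Notes on version B (the rewrite author's own statement) =====
-- stated objective: faster
-- what changed: Instead of comparing every pair of types (nested loops with prefix tests), B makes one pass collecting every '/'-cut prefix of every type into a set and then keeps the types not in that set.
import Mathlib
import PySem

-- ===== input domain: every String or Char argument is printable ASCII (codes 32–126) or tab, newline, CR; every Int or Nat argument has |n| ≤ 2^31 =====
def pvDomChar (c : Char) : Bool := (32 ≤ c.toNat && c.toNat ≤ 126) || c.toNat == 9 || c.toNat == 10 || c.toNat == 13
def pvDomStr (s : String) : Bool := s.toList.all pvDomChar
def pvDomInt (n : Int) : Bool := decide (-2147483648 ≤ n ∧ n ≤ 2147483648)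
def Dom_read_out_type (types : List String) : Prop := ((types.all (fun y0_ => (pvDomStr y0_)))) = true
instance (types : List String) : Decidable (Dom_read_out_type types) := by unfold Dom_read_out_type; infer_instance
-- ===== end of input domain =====

-- B replaces A's all-pairs prefix tests by one pass collecting every '/'-cut prefix into a set (faster).

-- ===== PORT A =====
-- b[:len(a)] is ported as List.take on toList (exact: 0 ≤ len(a)); b[len(a)] as [_]? (exact:
-- when it would be an IndexError Python never evaluates it, here the branch just returns none ≠ some '/').
def read_out_type (types : List String) : List String :=
  types.foldl (fun out a =>
    let flag := types.foldl (fun flag b =>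
      if a.toList.length ≥ b.toList.length then flag
      else if a.toList = b.toList.take a.toList.length ∧ b.toList[a.toList.length]? = some '/' then false
      else flag) true
    if flag then out ++ [a] else out) []

-- ===== PORT B =====
def read_out_type_alt (types : List String) : List String :=
  let parents : PySem.Set String := types.foldl (fun s b =>
    (PySem.List.enumerate b.toList).foldl (fun s p =>
      if p.2 = '/' then PySem.Set.add s (String.ofList (b.toList.take p.1.toNat)) else s) s)
    PySem.Set.empty
  types.filter (fun a => ! PySem.Set.contains parents a)

-- ===== PRECONDITION & SPEC =====
def Spec_read_out_type (types : List String) (out : List String) : Prop := out = read_out_type_alt types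
instance (types : List String) (out : List String) : Decidable (Spec_read_out_type types out) := by unfold Spec_read_out_type; infer_instance

-- ===== CLAIM (what is proved, stated in full; the proofs are below) =====
def Claim_equal_read_out_type : Prop := ∀ (types : List String), Dom_read_out_type types → Spec_read_out_type types (read_out_type types)

-- ===== LEMMAS AND PROOFS =====

-- A's inner flag loop is an 'all' over the pair condition (the length guard is absorbed:
-- b[len a]? = some '/' already forces len a < len b).
theorem foldA_eq (a : List Char) (ts : List String) (init : Bool) :
    ts.foldl (fun flag b =>
      if a.length ≥ b.toList.length then flag
      else if a = b.toList.take a.length ∧ b.toList[a.length]? = some '/' then false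
      else flag) init
    = (init && ts.all (fun b => ! decide (a = b.toList.take a.length ∧ b.toList[a.length]? = some '/'))) := by
  induction ts generalizing init with
  | nil => simp
  | cons b ts ih =>
    simp only [List.foldl_cons, List.all_cons]
    split_ifs with h1 h2
    · have hn : b.toList[a.length]? = none := by
        rw [List.getElem?_eq_none_iff]; omega
      rw [ih]
      have hd : (decide (a = b.toList.take a.length ∧ b.toList[a.length]? = some '/')) = false := by
        simp only [hn, decide_eq_false_iff_not]
        rintro ⟨-, h⟩
        cases h
      rw [hd]
      simp
    · rw [ih, decide_eq_true h2]
      simp only [Bool.not_true, Bool.false_and, Bool.and_false]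
    · rw [ih, decide_eq_false h2]
      simp only [Bool.not_false, Bool.true_and]

-- membership in the inner prefix-collecting fold
theorem mem_innerB (l : List Char) (ps : List (Int × Char)) (s : PySem.Set String) (x : String) :
    x ∈ ps.foldl (fun s p =>
        if p.2 = '/' then PySem.Set.add s (String.ofList (l.take p.1.toNat)) else s) s
    ↔ x ∈ s ∨ ∃ p ∈ ps, p.2 = '/' ∧ x = String.ofList (l.take p.1.toNat) := by
  induction ps generalizing s with
  | nil => simp
  | cons p ps ih =>
    simp only [List.foldl_cons]
    split_ifs with h
    · rw [ih, PySem.Set.mem_add]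
      constructor
      · rintro (⟨hs | hx⟩ | h2)
        · exact Or.inl hs
        · exact Or.inr ⟨p, List.mem_cons_self .., h, hx⟩
        · obtain ⟨q, hq, h1, h2⟩ := h2
          exact Or.inr ⟨q, List.mem_cons_of_mem _ hq, h1, h2⟩
      · rintro (hs | ⟨q, hq, h1, h2⟩)
        · exact Or.inl (Or.inl hs)
        · rcases List.mem_cons.mp hq with rfl | hq
          · exact Or.inl (Or.inr h2)
          · exact Or.inr ⟨q, hq, h1, h2⟩
    · rw [ih]
      constructor
      · rintro (hs | ⟨q, hq, h1, h2⟩)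
        · exact Or.inl hs
        · exact Or.inr ⟨q, List.mem_cons_of_mem _ hq, h1, h2⟩
      · rintro (hs | ⟨q, hq, h1, h2⟩)
        · exact Or.inl hs
        · rcases List.mem_cons.mp hq with rfl | hq
          · exact absurd h1 h
          · exact Or.inr ⟨q, hq, h1, h2⟩

-- membership in B's parents set
theorem mem_parents (ts : List String) (s : PySem.Set String) (x : String) :
    x ∈ ts.foldl (fun s b =>
        (PySem.List.enumerate b.toList).foldl (fun s p =>
          if p.2 = '/' then PySem.Set.add s (String.ofList (b.toList.take p.1.toNat)) else s) s) s
    ↔ x ∈ s ∨ ∃ b ∈ ts, ∃ p ∈ PySem.List.enumerate b.toList, p.2 = '/' ∧ x = String.ofList (b.toList.take p.1.toNat) := by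
  induction ts generalizing s with
  | nil => simp
  | cons b ts ih =>
    simp only [List.foldl_cons]
    rw [ih, mem_innerB]
    constructor
    · rintro (⟨hs | hb⟩ | ⟨c, hc, rest⟩)
      · exact Or.inl hs
      · exact Or.inr ⟨b, List.mem_cons_self .., hb⟩
      · exact Or.inr ⟨c, List.mem_cons_of_mem _ hc, rest⟩
    · rintro (hs | ⟨c, hc, rest⟩)
      · exact Or.inl (Or.inl hs)
      · rcases List.mem_cons.mp hc with rfl | hc
        · exact Or.inl (Or.inr rest)
        · exact Or.inr ⟨c, hc, rest⟩

-- per-pair bridge: a has a '/'-cut in b iff a is one of b's collected prefixes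
theorem pair_bridge (a : String) (b : String) :
    (a.toList = b.toList.take a.toList.length ∧ b.toList[a.toList.length]? = some '/')
    ↔ ∃ p ∈ PySem.List.enumerate b.toList, p.2 = '/' ∧ a = String.ofList (b.toList.take p.1.toNat) := by
  constructor
  · rintro ⟨htake, hget⟩
    have hlt : a.toList.length < b.toList.length := by
      by_contra h
      rw [List.getElem?_eq_none_iff.mpr (by omega)] at hget
      cases hget
    refine ⟨((a.toList.length : Int), b.toList[a.toList.length]), ?_, ?_, ?_⟩
    · rw [PySem.List.mem_enumerate_iff]
      exact ⟨a.toList.length, hlt, by simp⟩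
    · rw [List.getElem?_eq_getElem hlt] at hget
      exact Option.some.inj hget
    · simp only [Int.toNat_natCast]
      rw [← htake]
      exact a.ofList_toList.symm
  · rintro ⟨p, hp, hslash, hx⟩
    rw [PySem.List.mem_enumerate_iff] at hp
    obtain ⟨k, hk, rfl⟩ := hp
    simp only [zero_add, Int.toNat_natCast] at hslash hx
    have hlist : a.toList = b.toList.take k := by rw [hx]; simp
    have hlen : a.toList.length = k := by rw [hlist, List.length_take]; omega
    constructor
    · rw [hlen, hlist]
    · rw [hlen, List.getElem?_eq_getElem hk, hslash]

-- the two element tests agree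
theorem test_eq (types : List String) (a : String) :
    (types.foldl (fun flag b =>
      if a.toList.length ≥ b.toList.length then flag
      else if a.toList = b.toList.take a.toList.length ∧ b.toList[a.toList.length]? = some '/' then false
      else flag) true)
    = (! PySem.Set.contains (types.foldl (fun s b =>
        (PySem.List.enumerate b.toList).foldl (fun s p =>
          if p.2 = '/' then PySem.Set.add s (String.ofList (b.toList.take p.1.toNat)) else s) s)
        PySem.Set.empty) a) := by
  rw [foldA_eq, Bool.true_and, Bool.eq_iff_iff]
  rw [Bool.not_eq_true']
  rw [← Bool.not_eq_true, PySem.Set.contains_iff, mem_parents]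
  simp only [List.all_eq_true, Bool.not_eq_true', decide_eq_false_iff_not,
    PySem.Set.empty, List.not_mem_nil, false_or, not_exists]
  constructor
  · intro h
    rintro b ⟨hb, hp⟩
    exact h b hb ((pair_bridge a b).mpr hp)
  · intro h b hb hc
    exact h b ⟨hb, (pair_bridge a b).mp hc⟩

-- ===== VERDICT (by name: the statement is the Claim_ definition above) =====
theorem read_out_type_spec : Claim_equal_read_out_type := by
  intro types _
  unfold Spec_read_out_type read_out_type read_out_type_alt
  rw [PySem.List.foldl_append_if_eq_filter, List.nil_append]
  exact List.filter_congr (fun a _ => test_eq types a)
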